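-- pv_equiv track=rewrite | github.com/CuriousCI/university | python/homework/2-required/alogs.py | xkcd_to_list_of_weights
-- ===== SOURCE A (Python) =====
-- def xkcd_to_list_of_weights(xkcd: str) -> list[int]:
--     """
--     Spezza una stringa in codifica XKCD nella corrispondente
--     lista di interi, ciascuno corrispondente al peso di una lettera romana
--
--     Parameters
--     xkcd : str              stringa nel formato XKCD
--     Returns
--     list[int]               lista di 'pesi' corrispondenti alle lettere romane
--
--     Esempio: '10010010010100511' -> [100, 100, 100, 10, 100, 5, 1, 1]
--     """
--     # keys = (
--     #     ("1000", "a"),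
--     #     ("100", "b"),
--     #     ("10", "c"),
--     #     ("1", "d"),
--     #     ("500", "e"),
--     #     ("50", "f"),
--     #     ("5", "g"),
--     # )
--     # weigths = {"a": 1000, "b": 100, "c": 10, "d": 1, "e": 500, "f": 50, "g": 5}
--     #
--     # for weigth, key in keys:
--     #     xkcd = xkcd.replace(weigth, key)
--     #
--     # return [weigths[key] for key in xkcd]
--
--     weigth, weigths = "", []
--
--     for digit in xkcd[::-1]:
--         weigth = digit + weigth
--
--         if digit != "0":
--             weigths.append(weigth)
--             weigth = ""
--
--     return list(map(int, weigths))[::-1]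
-- ===== SOURCE B (Python) =====
-- def xkcd_to_list_of_weights(xkcd: str) -> list[int]:
--     # Single forward pass: a non-'0' digit starts a new token, a '0' extends
--     # the last token (leading zeros are dropped); no reversals needed.
--     tokens = []
--     for digit in xkcd:
--         if digit != "0":
--             tokens.append(digit)
--         elif tokens:
--             tokens[-1] += "0"
--     return [int(t) for t in tokens]
-- ===== Notes on version B (the rewrite author's own statement) =====
-- stated objective: simpler
-- what changed: B tokenizes in one left-to-right pass, appending a new token on each non-'0' character and attaching '0's to the last token, instead of A's right-to-left scan with string prepending followed by a final list reversal.
import Mathlib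
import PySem

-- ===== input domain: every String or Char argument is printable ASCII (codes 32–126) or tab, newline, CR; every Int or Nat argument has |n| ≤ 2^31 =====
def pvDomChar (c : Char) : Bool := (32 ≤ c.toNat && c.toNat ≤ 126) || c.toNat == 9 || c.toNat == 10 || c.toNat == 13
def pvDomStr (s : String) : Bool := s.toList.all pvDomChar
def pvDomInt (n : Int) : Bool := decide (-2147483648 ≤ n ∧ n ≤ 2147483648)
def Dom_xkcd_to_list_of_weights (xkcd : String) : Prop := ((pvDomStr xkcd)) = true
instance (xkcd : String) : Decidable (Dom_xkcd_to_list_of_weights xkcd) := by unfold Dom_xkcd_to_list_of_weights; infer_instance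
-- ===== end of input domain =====

-- B replaces A's right-to-left scan + final reversal with one forward pass that
-- appends a new token per non-'0' char and attaches '0's to the last token (simpler).

-- ===== PORT A =====
-- int(t); Python raises ValueError where ofStr? is none (excluded by Pre_); getD 0 is never reached there
def pvInt (t : List Char) : Int := (PySem.Int.ofStr? (String.ofList t)).getD 0

-- loop body of A: weigth = digit + weigth; if digit != "0": append and reset
def pvAStep (st : List Char × List (List Char)) (digit : Char) : List Char × List (List Char) :=
  let weigth := digit :: st.1
  if digit ≠ '0' then ([], st.2 ++ [weigth]) else (weigth, st.2)

def xkcd_to_list_of_weights (xkcd : String) : List Int :=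
  -- for digit in xkcd[::-1]: …   then  list(map(int, weigths))[::-1]
  let st := xkcd.toList.reverse.foldl pvAStep ([], [])
  (st.2.map pvInt).reverse

-- ===== PORT B =====
-- tokens[-1] += "0": extend the last token with '0'
def pvAddZero : List (List Char) → List (List Char)
  | [] => []
  | [t] => [t ++ ['0']]
  | t :: ts => t :: pvAddZero ts

def pvBStep (tokens : List (List Char)) (digit : Char) : List (List Char) :=
  if digit ≠ '0' then tokens ++ [[digit]]
  else match tokens with
    | [] => []                      -- `elif tokens:` false — leading zero dropped
    | ts => pvAddZero ts

def xkcd_to_list_of_weights_alt (xkcd : String) : List Int :=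
  (xkcd.toList.foldl pvBStep []).map pvInt

-- ===== PRECONDITION & SPEC =====
-- Pre_ excludes exactly the inputs on which Python A raises ValueError (some token —
-- a non-'0' character plus its run of '0's — is not accepted by int(), i.e. the
-- character is neither a digit nor a sign/whitespace followed by a '0'); B raises there too.
def pvIntOkable : List Char → Bool
  | [] => true
  | c :: t =>
    if c.isDigit then pvIntOkable t
    else if (c = '+' || c = '-' || c = ' ' || c = '\t' || c = '\n' || c = '\r')
            && t.head? == some '0' then pvIntOkable t
    else false

def Pre_xkcd_to_list_of_weights (xkcd : String) : Prop :=
  pvIntOkable xkcd.toList = true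
instance (xkcd : String) : Decidable (Pre_xkcd_to_list_of_weights xkcd) := by
  unfold Pre_xkcd_to_list_of_weights; infer_instance

def pvWitness_xkcd_to_list_of_weights : String := "10010010010100511"

def Spec_xkcd_to_list_of_weights (xkcd : String) (out : List Int) : Prop := out = xkcd_to_list_of_weights_alt xkcd
instance (xkcd : String) (out : List Int) : Decidable (Spec_xkcd_to_list_of_weights xkcd out) := by unfold Spec_xkcd_to_list_of_weights; infer_instance

-- ===== CLAIM (what is proved, stated in full; the proofs are below) =====
def Claim_equal_xkcd_to_list_of_weights : Prop := ∀ (xkcd : String), Dom_xkcd_to_list_of_weights xkcd → Pre_xkcd_to_list_of_weights xkcd → Spec_xkcd_to_list_of_weights xkcd (xkcd_to_list_of_weights xkcd)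

-- ===== LEMMAS AND PROOFS =====

-- common tokenization spec: a token is a non-'0' char followed by its run of '0's;
-- leading '0's are dropped
def pvTok : List Char → List (List Char)
  | [] => []
  | c :: t =>
    if c = '0' then pvTok t
    else (c :: t.takeWhile (· = '0')) :: pvTok (t.dropWhile (· = '0'))
termination_by l => l.length
decreasing_by
  all_goals simp only [List.length_cons]
  · omega
  · have := List.length_dropWhile_le (p := fun c => decide (c = '0')) (l := t)
    omega

@[simp] theorem pvTok_nil : pvTok [] = [] := by simp [pvTok]

theorem pvTok_dropWhile (t : List Char) : pvTok (t.dropWhile (· = '0')) = pvTok t := by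
  induction t with
  | nil => rfl
  | cons c t ih =>
    by_cases h : c = '0'
    · subst h; rw [List.dropWhile_cons_of_pos (by simp)]; rw [ih]; simp [pvTok]
    · rw [List.dropWhile_cons_of_neg (by simp [h])]

-- A's reversed fold, seen as a foldr: the pending string is the run of leading '0's,
-- the accumulator is the token list in reverse
theorem pvA_foldr (l : List Char) :
    l.foldr (fun c st => pvAStep st c) (([], []) : List Char × List (List Char))
      = (l.takeWhile (· = '0'), (pvTok l).reverse) := by
  induction l with
  | nil => simp
  | cons c t ih =>
    rw [List.foldr_cons, ih]
    by_cases h : c = '0'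
    · subst h
      simp [pvAStep, pvTok]
    · simp only [pvAStep, if_pos h]
      rw [List.takeWhile_cons_of_neg (by simp [h])]
      simp [pvTok, h, pvTok_dropWhile]

theorem pvAddZero_concat (Q : List (List Char)) (u : List Char) :
    pvAddZero (Q ++ [u]) = Q ++ [u ++ ['0']] := by
  induction Q with
  | nil => rfl
  | cons q Q ih =>
    cases Q with
    | nil => rfl
    | cons q' Q' =>
      have h1 : pvAddZero ((q :: q' :: Q') ++ [u]) = q :: pvAddZero ((q' :: Q') ++ [u]) := rfl
      rw [h1, ih]; rfl

-- B's fold from a non-empty token list: leading '0's extend the last token,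
-- the rest is tokenized fresh
theorem pvB_foldl_concat (t : List Char) (Q : List (List Char)) (u : List Char) :
    List.foldl pvBStep (Q ++ [u]) t
      = Q ++ [u ++ t.takeWhile (· = '0')] ++ pvTok (t.dropWhile (· = '0')) := by
  induction t generalizing Q u with
  | nil => simp
  | cons c t ih =>
    by_cases h : c = '0'
    · subst h
      have hstep : pvBStep (Q ++ [u]) '0' = Q ++ [u ++ ['0']] := by
        cases Q with
        | nil => simpa [pvBStep] using pvAddZero_concat [] u
        | cons q Q' => simpa [pvBStep] using pvAddZero_concat (q :: Q') u
      rw [List.foldl_cons, hstep, ih]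
      simp
    · have hstep : pvBStep (Q ++ [u]) c = (Q ++ [u]) ++ [[c]] := by
        simp [pvBStep, h]
      rw [List.foldl_cons, hstep, ih (Q ++ [u]) [c]]
      rw [List.takeWhile_cons_of_neg (by simp [h]), List.dropWhile_cons_of_neg (by simp [h])]
      simp [pvTok, h]

theorem pvB_foldl (l : List Char) : List.foldl pvBStep [] l = pvTok l := by
  induction l with
  | nil => simp
  | cons c t ih =>
    by_cases h : c = '0'
    · subst h
      have hstep : pvBStep [] '0' = [] := rfl
      rw [List.foldl_cons, hstep, ih]
      simp [pvTok]
    · have hstep : pvBStep [] c = [] ++ [[c]] := by simp [pvBStep, h]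
      rw [List.foldl_cons, hstep, pvB_foldl_concat]
      simp [pvTok, h]

theorem pv_eq (xkcd : String) :
    xkcd_to_list_of_weights xkcd = xkcd_to_list_of_weights_alt xkcd := by
  unfold xkcd_to_list_of_weights xkcd_to_list_of_weights_alt
  rw [List.foldl_reverse, pvB_foldl]
  have h := pvA_foldr xkcd.toList
  simp only [h, List.map_reverse, List.reverse_reverse]

-- ===== VERDICT (by name: the statement is the Claim_ definition above) =====
theorem xkcd_to_list_of_weights_spec : Claim_equal_xkcd_to_list_of_weights := by
  intro xkcd _ _
  unfold Spec_xkcd_to_list_of_weights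
  exact pv_eq xkcd
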